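-- pv_equiv track=rewrite | github.com/acts-project/acts | Examples/Algorithms/Digitization/scripts/smearing-config.py | get_param_blocks
-- ===== SOURCE A (Python) =====
-- def get_n_params(type_id):
--     if type_id == 0:
--         return 1
--     return 3
--
-- def get_param_blocks(types_ids, params):
--     blocks = []
--     icur = 0
--     for x in types_ids:
--         n = get_n_params(x)
--         blocks.append(params[icur : icur + n])
--         icur += n
--     return blocks
-- ===== SOURCE B (Python) =====
-- def get_n_params(type_id):
--     if type_id == 0:
--         return 1
--     return 3
--
-- def get_param_blocks(types_ids, params):
--     # consume params as a stream: build each block element-by-element with next();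
--     # no slicing, no index/cursor arithmetic anywhere
--     it = iter(params)
--     blocks = []
--     for x in types_ids:
--         block = []
--         for _ in range(get_n_params(x)):
--             try:
--                 block.append(next(it))
--             except StopIteration:
--                 break
--         blocks.append(block)
--     return blocks
-- ===== Notes on version B (the rewrite author's own statement) =====
-- stated objective: alternative
-- what changed: B consumes params as an iterator stream, building each block element-by-element with next() until n elements are taken or the stream ends, instead of A's cursor-indexed slicing of the original list.
import Mathlib
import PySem

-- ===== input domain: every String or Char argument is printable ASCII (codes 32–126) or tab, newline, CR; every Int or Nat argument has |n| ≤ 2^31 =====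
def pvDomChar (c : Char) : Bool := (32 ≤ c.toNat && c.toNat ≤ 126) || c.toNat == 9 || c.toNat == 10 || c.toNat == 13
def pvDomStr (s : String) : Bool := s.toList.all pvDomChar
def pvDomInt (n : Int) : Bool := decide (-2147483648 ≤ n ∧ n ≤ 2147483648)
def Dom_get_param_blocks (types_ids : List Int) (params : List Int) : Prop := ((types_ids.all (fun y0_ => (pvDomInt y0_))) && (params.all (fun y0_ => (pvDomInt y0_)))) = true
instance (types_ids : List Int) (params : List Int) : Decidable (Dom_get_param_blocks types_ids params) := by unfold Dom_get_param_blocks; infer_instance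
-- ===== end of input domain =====

-- B consumes params as an iterator stream, building each block element-by-element
-- with next() instead of A's cursor-indexed slicing (alternative decomposition, same cost).


-- ===== PORT A =====
def get_n_params (type_id : Int) : Int :=
  if type_id == 0 then 1 else 3

def get_param_blocks (types_ids : List Int) (params : List Int) : List (List Int) :=
  (types_ids.foldl
    (fun (st : List (List Int) × Int) x =>
      let n := get_n_params x
      (st.1 ++ [PySem.List.slice params (some st.2) (some (st.2 + n))], st.2 + n))
    ([], 0)).1

-- ===== PORT B =====
-- B's inner loop: pull up to k elements off the iterator (next() with
-- StopIteration stopping the loop); returns (block, remaining iterator).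
def pvTakeNext (k : Nat) (it : List Int) : List Int × List Int :=
  match k, it with
  | 0, it => ([], it)
  | _ + 1, [] => ([], [])
  | k + 1, a :: it =>
      let r := pvTakeNext k it
      (a :: r.1, r.2)

def get_param_blocks_alt (types_ids : List Int) (params : List Int) : List (List Int) :=
  (types_ids.foldl
    (fun (st : List (List Int) × List Int) x =>
      let r := pvTakeNext (get_n_params x).toNat st.2
      (st.1 ++ [r.1], r.2))
    ([], params)).1

-- ===== PRECONDITION & SPEC =====
def Spec_get_param_blocks (types_ids : List Int) (params : List Int) (out : List (List Int)) : Prop := out = get_param_blocks_alt types_ids params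
instance (types_ids : List Int) (params : List Int) (out : List (List Int)) : Decidable (Spec_get_param_blocks types_ids params out) := by unfold Spec_get_param_blocks; infer_instance

-- ===== CLAIM =====
def Claim_equal_get_param_blocks : Prop := ∀ (types_ids : List Int) (params : List Int), Dom_get_param_blocks types_ids params → Spec_get_param_blocks types_ids params (get_param_blocks types_ids params)

-- ===== LEMMAS AND PROOFS =====

theorem pvTakeNext_eq (k : Nat) (it : List Int) :
    pvTakeNext k it = (it.take k, it.drop k) := by
  induction k generalizing it with
  | zero => simp [pvTakeNext]
  | succ k ih => cases it <;> simp [pvTakeNext, ih]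

theorem get_n_params_eq (x : Int) :
    get_n_params x = ((if x == 0 then 1 else 3 : Nat) : Int) := by
  unfold get_n_params; split <;> simp

/-- A's cursor loop at natural cursor `j` matches B's stream loop whose remaining
iterator is `params.drop j`, for any common accumulator. -/
theorem foldl_cursor_eq_stream (types_ids : List Int) (params : List Int)
    (acc : List (List Int)) (j : Nat) :
    (types_ids.foldl
      (fun (st : List (List Int) × Int) x =>
        let n := get_n_params x
        (st.1 ++ [PySem.List.slice params (some st.2) (some (st.2 + n))], st.2 + n))
      (acc, (j : Int))).1
    = (types_ids.foldl
        (fun (st : List (List Int) × List Int) x =>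
          let r := pvTakeNext (get_n_params x).toNat st.2
          (st.1 ++ [r.1], r.2))
        (acc, params.drop j)).1 := by
  induction types_ids generalizing acc j with
  | nil => simp
  | cons x rest ih =>
      have hn : get_n_params x = ((if x == 0 then 1 else 3 : Nat) : Int) := get_n_params_eq x
      set m : Nat := if x == 0 then 1 else 3 with hm
      simp only [List.foldl_cons, hn, pvTakeNext_eq, Int.toNat_natCast]
      have hcast : (j : Int) + (m : Int) = ((j + m : Nat) : Int) := by push_cast; ring
      have h1 : PySem.List.slice params (some (j : Int)) (some ((j + m : Nat) : Int))
          = (params.drop j).take m := by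
        have := PySem.List.slice_natCast params j (j + m)
        simpa using this
      rw [hcast, h1, ih]
      simp [pvTakeNext_eq, List.drop_drop, Nat.add_comm]

-- ===== VERDICT =====
theorem get_param_blocks_spec : Claim_equal_get_param_blocks := by
  intro types_ids params _
  unfold Spec_get_param_blocks get_param_blocks get_param_blocks_alt
  simpa using foldl_cursor_eq_stream types_ids params [] 0
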